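-- pv_equiv track=rewrite | github.com/ThuraAung1601/python_practice | homework13/no3.py | perm3
-- ===== SOURCE A (Python) =====
-- def perm3(t, i=0, j=0, k=0, result=""):
--     if i == len(t):
--         return result
--     if j == len(t):
--         return perm3(t, i + 1, 0, 0, result)
--     if k == len(t):
--         return perm3(t, i, j + 1, 0, result)
--     if i != j and j != k and i != k:
--         result += f"({t[i]}, {t[j]}, {t[k]})"
--     return perm3(t, i, j, k + 1, result)
-- ===== SOURCE B (Python) =====
-- # Same triple enumeration as A, but as three nested for-loops (the first sweep
-- # resuming at the given j and k) instead of one self-call per cell; avoids the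
-- # ~n^3 Python call frames (and the recursion limit A hits on larger lists).
-- def perm3(t, i=0, j=0, k=0, result=""):
--     n = len(t)
--     for ii in range(i, n):
--         for jj in range(j if ii == i else 0, n):
--             for kk in range(k if (ii == i and jj == j) else 0, n):
--                 if ii != jj and jj != kk and ii != kk:
--                     result += f"({t[ii]}, {t[jj]}, {t[kk]})"
--     return result
-- ===== Notes on version B (the rewrite author's own statement) =====
-- stated objective: faster
-- what changed: Replaces the accumulator-passing recursion (one Python call per k-step, with reset branches for j==len and k==len) by three nested for-loops whose first sweep resumes at the given j and k, concatenating directly onto result; also avoids the recursion limit A hits on larger lists.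
-- outside the precondition, e.g. on perm3(['a', 'b'], 0, 0, -5, 'x'): A returns 'x', B returns 'x'
import Mathlib
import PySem

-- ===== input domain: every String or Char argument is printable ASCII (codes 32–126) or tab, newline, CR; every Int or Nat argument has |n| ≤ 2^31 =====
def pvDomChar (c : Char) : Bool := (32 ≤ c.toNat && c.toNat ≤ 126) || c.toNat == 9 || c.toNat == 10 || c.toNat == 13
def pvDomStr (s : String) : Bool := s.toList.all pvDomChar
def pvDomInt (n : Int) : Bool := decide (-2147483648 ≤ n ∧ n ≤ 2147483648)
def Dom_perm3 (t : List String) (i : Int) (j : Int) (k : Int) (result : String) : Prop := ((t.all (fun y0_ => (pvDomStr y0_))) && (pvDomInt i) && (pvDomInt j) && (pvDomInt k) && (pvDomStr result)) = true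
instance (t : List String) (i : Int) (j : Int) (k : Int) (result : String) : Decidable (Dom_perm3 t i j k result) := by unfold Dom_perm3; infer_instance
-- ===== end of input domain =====

-- B replaces A's accumulator-passing recursion by three nested loops (first sweep
-- resuming at the given j and k), removing one Python call frame per k-step (objective: faster).


-- ===== PORT A =====
-- f"({t[i]}, {t[j]}, {t[k]})" — shared by both ports; pyGetD is exact under Pre_ (indices in range when the guard fires)
def pvCell (t : List String) (a b c : Int) : String :=
  "(" ++ PySem.List.pyGetD t a "" ++ ", " ++ PySem.List.pyGetD t b "" ++ ", " ++ PySem.List.pyGetD t c "" ++ ")"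

-- fuel bound for A's recursion (A genuinely diverges on some out-of-Pre_ inputs, so the port is fuelled)
def pvMeasure (n i j k : Int) : Nat :=
  (n - i).toNat * ((2 * n.toNat + 1) * (2 * n.toNat + 1)) + (n - j).toNat * (2 * n.toNat + 1) + (n - k).toNat

def perm3Go (fuel : Nat) (t : List String) (i j k : Int) (result : String) : String :=
  match fuel with
  | 0 => result
  | fuel + 1 =>
    if i = (t.length : Int) then result
    else if j = (t.length : Int) then perm3Go fuel t (i + 1) 0 0 result
    else if k = (t.length : Int) then perm3Go fuel t i (j + 1) 0 result
    else perm3Go fuel t i j (k + 1)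
      (if i ≠ j ∧ j ≠ k ∧ i ≠ k then result ++ pvCell t i j k else result)

def perm3 (t : List String) (i : Int) (j : Int) (k : Int) (result : String) : String :=
  perm3Go (pvMeasure (t.length : Int) i j k + 1) t i j k result

-- ===== PORT B =====
-- innermost loop: for kk in range(s, len(t)): if distinct: result += cell
def pvKloop (t : List String) (ii jj s : Int) (acc : String) : String :=
  (PySem.List.pyRange s (t.length : Int) 1).foldl
    (fun acc kk => if ii ≠ jj ∧ jj ≠ kk ∧ ii ≠ kk then acc ++ pvCell t ii jj kk else acc) acc

-- middle loop for one ii: for jj in range(j if ii == i else 0, len(t)): kk-loop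
def pvJloop (t : List String) (i j k ii : Int) (acc : String) : String :=
  (PySem.List.pyRange (if ii = i then j else 0) (t.length : Int) 1).foldl
    (fun acc jj => pvKloop t ii jj (if ii = i ∧ jj = j then k else 0) acc) acc

def perm3_alt (t : List String) (i : Int) (j : Int) (k : Int) (result : String) : String :=
  (PySem.List.pyRange i (t.length : Int) 1).foldl (fun acc ii => pvJloop t i j k ii acc) result

-- ===== PRECONDITION & SPEC =====
-- Pre_ keeps the resume indices i, j, k within [-len(t), len(t)] (j and k are
-- unconstrained once an earlier index already equals len(t), where A ignores them):
-- outside that A usually recurses without bound (RecursionError: an index above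
-- len(t) is never reset) or indexes below -len(t) (IndexError); on rare such corner
-- inputs whose sweeps make no distinct-index access A still returns, and B returns
-- the same value there (see cites).
def Pre_perm3 (t : List String) (i : Int) (j : Int) (k : Int) (result : String) : Prop :=
  -(t.length : Int) ≤ i ∧ i ≤ (t.length : Int) ∧
  (i = (t.length : Int) ∨
    (-(t.length : Int) ≤ j ∧ j ≤ (t.length : Int) ∧
      (j = (t.length : Int) ∨ (-(t.length : Int) ≤ k ∧ k ≤ (t.length : Int)))))
instance (t : List String) (i : Int) (j : Int) (k : Int) (result : String) : Decidable (Pre_perm3 t i j k result) := by unfold Pre_perm3; infer_instance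

def pvWitness_perm3 : List String × Int × Int × Int × String := (["a", "b", "c"], 0, 0, 0, "")

def Spec_perm3 (t : List String) (i : Int) (j : Int) (k : Int) (result : String) (out : String) : Prop := out = perm3_alt t i j k result
instance (t : List String) (i : Int) (j : Int) (k : Int) (result : String) (out : String) : Decidable (Spec_perm3 t i j k result out) := by unfold Spec_perm3; infer_instance

-- ===== CLAIM (what is proved, stated in full; the proofs are below) =====
def Claim_equal_perm3 : Prop := ∀ (t : List String) (i : Int) (j : Int) (k : Int) (result : String), Dom_perm3 t i j k result → Pre_perm3 t i j k result → Spec_perm3 t i j k result (perm3 t i j k result)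

-- ===== LEMMAS AND PROOFS =====

-- what any row with ii different from the resume index computes
def pvJview (t : List String) (ii : Int) (acc : String) : String :=
  (PySem.List.pyRange 0 (t.length : Int) 1).foldl
    (fun acc jj => pvKloop t ii jj 0 acc) acc

lemma pvJloop_ne {t : List String} {i ii : Int} (j k : Int) (acc : String) (hii : ii ≠ i) :
    pvJloop t i j k ii acc = pvJview t ii acc := by
  simp [pvJloop, pvJview, hii]

lemma pvJloop_zero_zero (t : List String) (i ii : Int) (acc : String) :
    pvJloop t i 0 0 ii acc = pvJview t ii acc := by
  simp [pvJloop, pvJview, ite_self]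

lemma pvAlt_i_eq (t : List String) (j k : Int) (result : String) :
    perm3_alt t (t.length : Int) j k result = result := by
  simp [perm3_alt, PySem.List.pyRange_one_eq_nil (le_refl _)]

lemma pvAlt_j_eq (t : List String) {i : Int} (k : Int) (result : String)
    (hi : i < (t.length : Int)) :
    perm3_alt t i (t.length : Int) k result = perm3_alt t (i + 1) 0 0 result := by
  simp only [perm3_alt]
  rw [PySem.List.pyRange_one_cons hi]
  simp only [List.foldl_cons]
  have h1 : pvJloop t i (t.length : Int) k i result = result := by
    simp [pvJloop, PySem.List.pyRange_one_eq_nil (le_refl _)]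
  rw [h1]
  apply PySem.List.foldl_congr_mem
  intro acc ii hmem
  have h2 : i + 1 ≤ ii := (PySem.List.mem_pyRange_one.mp hmem).1
  have hne : ii ≠ i := by omega
  rw [pvJloop_ne _ _ _ hne, pvJloop_zero_zero]

lemma pvAlt_k_eq (t : List String) {i j : Int} (result : String)
    (hi : i < (t.length : Int)) (hj : j < (t.length : Int)) :
    perm3_alt t i j (t.length : Int) result = perm3_alt t i (j + 1) 0 result := by
  simp only [perm3_alt]
  rw [PySem.List.pyRange_one_cons hi]
  simp only [List.foldl_cons]
  have h1 : pvJloop t i j (t.length : Int) i result = pvJloop t i (j + 1) 0 i result := by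
    simp only [pvJloop, if_true, true_and, ite_self]
    rw [PySem.List.pyRange_one_cons hj]
    simp only [List.foldl_cons, if_true]
    have h2 : pvKloop t i j (t.length : Int) result = result := by
      simp [pvKloop, PySem.List.pyRange_one_eq_nil (le_refl _)]
    rw [h2]
    apply PySem.List.foldl_congr_mem
    intro acc jj hmem
    have h3 : j + 1 ≤ jj := (PySem.List.mem_pyRange_one.mp hmem).1
    have h4 : jj ≠ j := by omega
    simp [h4]
  rw [h1]
  apply PySem.List.foldl_congr_mem
  intro acc ii hmem
  have h2 : i + 1 ≤ ii := (PySem.List.mem_pyRange_one.mp hmem).1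
  have hne : ii ≠ i := by omega
  rw [pvJloop_ne _ _ _ hne, pvJloop_ne _ _ _ hne]

lemma pvAlt_step (t : List String) {i j k : Int} (result : String)
    (hi : i < (t.length : Int)) (hj : j < (t.length : Int)) (hk : k < (t.length : Int)) :
    perm3_alt t i j k result =
      perm3_alt t i j (k + 1)
        (if i ≠ j ∧ j ≠ k ∧ i ≠ k then result ++ pvCell t i j k else result) := by
  simp only [perm3_alt]
  rw [PySem.List.pyRange_one_cons hi]
  simp only [List.foldl_cons]
  have h1 : pvJloop t i j k i result =
      pvJloop t i j (k + 1) i (if i ≠ j ∧ j ≠ k ∧ i ≠ k then result ++ pvCell t i j k else result) := by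
    simp only [pvJloop, if_true, true_and]
    rw [PySem.List.pyRange_one_cons hj]
    simp only [List.foldl_cons, if_true]
    have h2 : pvKloop t i j k result =
        pvKloop t i j (k + 1) (if i ≠ j ∧ j ≠ k ∧ i ≠ k then result ++ pvCell t i j k else result) := by
      simp only [pvKloop]
      rw [PySem.List.pyRange_one_cons hk]
      simp only [List.foldl_cons]
    rw [h2]
    apply PySem.List.foldl_congr_mem
    intro acc jj hmem
    have h3 : j + 1 ≤ jj := (PySem.List.mem_pyRange_one.mp hmem).1
    have h4 : jj ≠ j := by omega
    simp [h4]
  rw [h1]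
  apply PySem.List.foldl_congr_mem
  intro acc ii hmem
  have h2 : i + 1 ≤ ii := (PySem.List.mem_pyRange_one.mp hmem).1
  have hne : ii ≠ i := by omega
  rw [pvJloop_ne _ _ _ hne, pvJloop_ne _ _ _ hne]

lemma pvMeasure_dec2 {n i : Int} (k : Int) (hn : 0 ≤ n) (hi : i < n) :
    pvMeasure n (i + 1) 0 0 < pvMeasure n i n k := by
  unfold pvMeasure
  obtain ⟨a, ha⟩ : ∃ a, (n - i).toNat = a + 1 := ⟨(n - i).toNat - 1, by omega⟩
  have ha' : (n - (i + 1)).toNat = a := by omega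
  have hz : (n - n).toNat = 0 := by omega
  have hN0 : (n - 0).toNat = n.toNat := by omega
  rw [ha, ha', hz, hN0]
  have key : n.toNat * (2 * n.toNat + 1) + n.toNat < (2 * n.toNat + 1) * (2 * n.toNat + 1) := by
    nlinarith
  have h6 : (a + 1) * ((2 * n.toNat + 1) * (2 * n.toNat + 1)) =
      a * ((2 * n.toNat + 1) * (2 * n.toNat + 1)) + (2 * n.toNat + 1) * (2 * n.toNat + 1) := by
    ring
  have h7 : 0 ≤ (n - k).toNat := Nat.zero_le _
  linarith

lemma pvMeasure_dec3 {n j : Int} (i : Int) (hn : 0 ≤ n) (hj : j < n) :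
    pvMeasure n i (j + 1) 0 < pvMeasure n i j n := by
  unfold pvMeasure
  obtain ⟨b, hb⟩ : ∃ b, (n - j).toNat = b + 1 := ⟨(n - j).toNat - 1, by omega⟩
  have hb' : (n - (j + 1)).toNat = b := by omega
  have hz : (n - n).toNat = 0 := by omega
  have hN0 : (n - 0).toNat = n.toNat := by omega
  rw [hb, hb', hz, hN0]
  have h6 : (b + 1) * (2 * n.toNat + 1) = b * (2 * n.toNat + 1) + (2 * n.toNat + 1) := by ring
  linarith

lemma pvMeasure_dec4 {n k : Int} (i j : Int) (hk : k < n) :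
    pvMeasure n i j (k + 1) < pvMeasure n i j k := by
  unfold pvMeasure
  have : (n - (k + 1)).toNat < (n - k).toNat := by omega
  omega

lemma perm3Go_eq (t : List String) : ∀ (fuel : Nat) (i j k : Int) (result : String),
    i ≤ (t.length : Int) →
    (i = (t.length : Int) ∨ (j ≤ (t.length : Int) ∧ (j = (t.length : Int) ∨ k ≤ (t.length : Int)))) →
    pvMeasure (t.length : Int) i j k < fuel →
    perm3Go fuel t i j k result = perm3_alt t i j k result := by
  intro fuel
  induction fuel with
  | zero => intro i j k result _ _ hf; omega
  | succ fuel ih =>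
    intro i j k result hi hrest hf
    have hn : (0 : Int) ≤ (t.length : Int) := by positivity
    rw [perm3Go]
    by_cases h1 : i = (t.length : Int)
    · rw [if_pos h1, h1, pvAlt_i_eq]
    · rw [if_neg h1]
      have hi' : i < (t.length : Int) := lt_of_le_of_ne hi h1
      obtain ⟨hj, hrest2⟩ := hrest.resolve_left h1
      by_cases h2 : j = (t.length : Int)
      · rw [if_pos h2]
        subst h2
        rw [ih (i + 1) 0 0 result (by omega) (Or.inr ⟨hn, Or.inr hn⟩)
              (by have := pvMeasure_dec2 (n := (t.length : Int)) (i := i) k hn hi'; omega),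
            pvAlt_j_eq t k result hi']
      · rw [if_neg h2]
        have hj' : j < (t.length : Int) := lt_of_le_of_ne hj h2
        have hk : k ≤ (t.length : Int) := hrest2.resolve_left h2
        by_cases h3 : k = (t.length : Int)
        · rw [if_pos h3]
          subst h3
          rw [ih i (j + 1) 0 result hi (Or.inr ⟨by omega, Or.inr hn⟩)
                (by have := pvMeasure_dec3 (n := (t.length : Int)) (j := j) i hn hj'; omega),
              pvAlt_k_eq t result hi' hj']
        · rw [if_neg h3]
          have hk' : k < (t.length : Int) := lt_of_le_of_ne hk h3
          rw [ih i j (k + 1) _ hi (Or.inr ⟨hj, Or.inr (by omega)⟩)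
                (by have := pvMeasure_dec4 (n := (t.length : Int)) (k := k) i j hk'; omega),
              ← pvAlt_step t result hi' hj' hk']

-- ===== VERDICT (by name: the statement is the Claim_ definition above) =====
theorem perm3_spec : Claim_equal_perm3 := by
  intro t i j k result _ hpre
  unfold Spec_perm3 perm3
  obtain ⟨_, hi, hrest⟩ := hpre
  refine perm3Go_eq t _ i j k result hi ?_ (by omega)
  rcases hrest with h | ⟨_, hj, hrest2⟩
  · exact Or.inl h
  · rcases hrest2 with h | ⟨_, hk⟩
    · exact Or.inr ⟨hj, Or.inl h⟩
    · exact Or.inr ⟨hj, Or.inr hk⟩
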